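-- pv_equiv track=rewrite | github.com/Mardanyan1/VK_alogs | hw4.py | max_min_multiplication
-- ===== SOURCE A (Python) =====
-- def max_min_multiplication(arr):
--     if len(arr) < 3:
--         return -1
--
--     # Находим самый левый лист (всегда идём влево)
--     i = 1
--     while 2 * i + 1 < len(arr):
--         i = 2 * i + 1
--     min_val = arr[i]
--
--     # Находим самый правый лист (всегда идём вправо)
--     i = 2
--     while 2 * i + 2 < len(arr):
--         i = 2 * i + 2
--     max_val = arr[i]
--
--     return min_val * max_val
--
-- arr = [8, 9, 11, 7, 16, 3, 1]
-- ===== SOURCE B (Python) =====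
-- def max_min_multiplication(arr):
--     n = len(arr)
--     if n < 3:
--         return -1
--     left = (1 << (n.bit_length() - 1)) - 1
--     right = (1 << ((n + 1).bit_length() - 1)) - 2
--     return arr[left] * arr[right]
-- ===== Notes on version B (the rewrite author's own statement) =====
-- stated objective: simpler
-- what changed: Replaced the two iterative leaf descents (repeated i=2i+1 / i=2i+2) with closed-form bit-length index formulas for the leftmost and rightmost leaf.
import Mathlib
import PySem

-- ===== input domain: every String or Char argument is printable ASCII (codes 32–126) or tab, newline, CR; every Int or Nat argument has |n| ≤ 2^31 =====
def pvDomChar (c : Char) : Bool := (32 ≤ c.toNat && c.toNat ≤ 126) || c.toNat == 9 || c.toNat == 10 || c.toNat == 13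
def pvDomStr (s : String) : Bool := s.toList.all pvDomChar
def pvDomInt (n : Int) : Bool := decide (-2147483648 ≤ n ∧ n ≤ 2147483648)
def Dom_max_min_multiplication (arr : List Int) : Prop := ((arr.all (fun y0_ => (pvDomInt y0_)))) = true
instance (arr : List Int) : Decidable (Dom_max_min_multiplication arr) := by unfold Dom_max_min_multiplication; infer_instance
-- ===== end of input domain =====

-- B replaces A's two iterative leaf descents by closed-form bit-arithmetic index formulas (objective: simpler).

-- ===== PORT A =====
-- while 2*i+1 < n: i = 2*i+1   (indices stay nonnegative, so the loop state is a Nat)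
def pvGoLeft (n : Nat) (i : Nat) : Nat :=
  if 2 * i + 1 < n then pvGoLeft n (2 * i + 1) else i
termination_by n - i
decreasing_by omega

-- while 2*i+2 < n: i = 2*i+2
def pvGoRight (n : Nat) (i : Nat) : Nat :=
  if 2 * i + 2 < n then pvGoRight n (2 * i + 2) else i
termination_by n - i
decreasing_by omega

def max_min_multiplication (arr : List Int) : Int :=
  if arr.length < 3 then -1
  else
    -- the descents start inside the array and stay inside it, so arr[i] never raises;
    -- List.getD with the in-range Nat index is exact here
    let min_val := arr.getD (pvGoLeft arr.length 1) 0
    let max_val := arr.getD (pvGoRight arr.length 2) 0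
    min_val * max_val

-- ===== PORT B =====
-- n.bit_length() - 1 for n ≥ 1 is Nat.log2 n; (1 << b) is 2 ^ b
def max_min_multiplication_alt (arr : List Int) : Int :=
  let n := arr.length
  if n < 3 then -1
  else
    let left := 2 ^ (Nat.log2 n) - 1
    let right := 2 ^ (Nat.log2 (n + 1)) - 2
    arr.getD left 0 * arr.getD right 0

-- ===== PRECONDITION & SPEC =====
def Spec_max_min_multiplication (arr : List Int) (out : Int) : Prop := out = max_min_multiplication_alt arr
instance (arr : List Int) (out : Int) : Decidable (Spec_max_min_multiplication arr out) := by unfold Spec_max_min_multiplication; infer_instance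

-- ===== CLAIM (what is proved, stated in full; the proofs are below) =====
def Claim_equal_max_min_multiplication : Prop := ∀ (arr : List Int), Dom_max_min_multiplication arr → Spec_max_min_multiplication arr (max_min_multiplication arr)

-- ===== LEMMAS AND PROOFS =====

theorem pv_log2_eq {n k : Nat} (h1 : 2 ^ k ≤ n) (h2 : n < 2 ^ (k + 1)) : Nat.log2 n = k := by
  rw [Nat.log2_eq_log_two]
  exact Nat.log_eq_of_pow_le_of_lt_pow h1 h2

-- the left descent from 2^k - 1 ends at 2^(log2 n) - 1
theorem pvGoLeft_closed (n : Nat) : ∀ j k, Nat.log2 n ≤ k + j → 2 ^ k ≤ n →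
    pvGoLeft n (2 ^ k - 1) = 2 ^ (Nat.log2 n) - 1 := by
  intro j
  induction j with
  | zero =>
    intro k hk hle
    rw [pvGoLeft]
    have hk' : Nat.log2 n ≤ k := by omega
    have hpow : 2 ^ k ≥ 1 := Nat.one_le_two_pow
    have hlt : ¬ 2 * (2 ^ k - 1) + 1 < n := by
      intro hcon
      have : 2 ^ (k + 1) ≤ n := by
        have : 2 ^ (k + 1) = 2 * 2 ^ k := by ring
        omega
      have := Nat.le_log2 (n := n) (by omega) |>.mpr this
      rw [Nat.log2_eq_log_two] at *
      omega
    simp only [hlt, if_false]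
    have : Nat.log2 n = k := by
      apply pv_log2_eq hle
      have h2k : 2 ^ (k + 1) = 2 * 2 ^ k := by ring
      omega
    rw [this]
  | succ j ih =>
    intro k hk hle
    rw [pvGoLeft]
    by_cases hlt : 2 * (2 ^ k - 1) + 1 < n
    · simp only [hlt, if_true]
      have hpow : 2 ^ k ≥ 1 := Nat.one_le_two_pow
      have hrw : 2 * (2 ^ k - 1) + 1 = 2 ^ (k + 1) - 1 := by
        have : 2 ^ (k + 1) = 2 * 2 ^ k := by ring
        omega
      rw [hrw]
      exact ih (k + 1) (by omega) (by omega)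
    · simp only [hlt, if_false]
      have hpow : 2 ^ k ≥ 1 := Nat.one_le_two_pow
      have : Nat.log2 n = k := by
        apply pv_log2_eq hle
        have h2k : 2 ^ (k + 1) = 2 * 2 ^ k := by ring
        omega
      rw [this]

-- the right descent from 2^m - 2 ends at 2^(log2 (n+1)) - 2
theorem pvGoRight_closed (n : Nat) : ∀ j m, Nat.log2 (n + 1) ≤ m + j → 2 ≤ m → 2 ^ m ≤ n + 1 →
    pvGoRight n (2 ^ m - 2) = 2 ^ (Nat.log2 (n + 1)) - 2 := by
  intro j
  induction j with
  | zero =>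
    intro m hm h2m hle
    rw [pvGoRight]
    have hpow : 2 ^ m ≥ 4 := by
      calc (4 : Nat) = 2 ^ 2 := by norm_num
      _ ≤ 2 ^ m := Nat.pow_le_pow_right (by norm_num) h2m
    have hlt : ¬ 2 * (2 ^ m - 2) + 2 < n := by
      intro hcon
      have : 2 ^ (m + 1) ≤ n + 1 := by
        have : 2 ^ (m + 1) = 2 * 2 ^ m := by ring
        omega
      have := Nat.le_log2 (n := n + 1) (by omega) |>.mpr this
      omega
    simp only [hlt, if_false]
    have : Nat.log2 (n + 1) = m := by
      apply pv_log2_eq hle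
      have h2k : 2 ^ (m + 1) = 2 * 2 ^ m := by ring
      omega
    rw [this]
  | succ j ih =>
    intro m hm h2m hle
    rw [pvGoRight]
    have hpow : 2 ^ m ≥ 4 := by
      calc (4 : Nat) = 2 ^ 2 := by norm_num
      _ ≤ 2 ^ m := Nat.pow_le_pow_right (by norm_num) h2m
    by_cases hlt : 2 * (2 ^ m - 2) + 2 < n
    · simp only [hlt, if_true]
      have hrw : 2 * (2 ^ m - 2) + 2 = 2 ^ (m + 1) - 2 := by
        have : 2 ^ (m + 1) = 2 * 2 ^ m := by ring
        omega
      rw [hrw]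
      exact ih (m + 1) (by omega) (by omega) (by
        have : 2 ^ (m + 1) = 2 * 2 ^ m := by ring
        omega)
    · simp only [hlt, if_false]
      have : Nat.log2 (n + 1) = m := by
        apply pv_log2_eq hle
        have h2k : 2 ^ (m + 1) = 2 * 2 ^ m := by ring
        omega
      rw [this]

-- ===== VERDICT (by name: the statement is the Claim_ definition above) =====
theorem max_min_multiplication_spec : Claim_equal_max_min_multiplication := by
  intro arr _
  unfold Spec_max_min_multiplication max_min_multiplication max_min_multiplication_alt
  by_cases h : arr.length < 3
  · simp [h]
  · simp only [h, if_false]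
    have hn : 3 ≤ arr.length := by omega
    have hL : pvGoLeft arr.length 1 = 2 ^ (Nat.log2 arr.length) - 1 := by
      have := pvGoLeft_closed arr.length (Nat.log2 arr.length) 1
        (by omega) (by norm_num; omega)
      simpa using this
    have hR : pvGoRight arr.length 2 = 2 ^ (Nat.log2 (arr.length + 1)) - 2 := by
      have := pvGoRight_closed arr.length (Nat.log2 (arr.length + 1)) 2
        (by omega) (by omega) (by norm_num; omega)
      simpa using this
    rw [hL, hR]
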